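-- pv_equiv track=rewrite | github.com/FUKUDA-TOMOKI/fukuda | scripts/task2/survey_hotpot_3.py | is_valid_answer
-- ===== SOURCE A (Python) =====
-- def is_valid_answer(answer: str) -> bool:
--     """
--     answerにカンマが含まれており、
--     かつすべてのカンマの直前の文字が数字でない場合にTrueを返す。
--     """
--     if "," not in answer:
--         return False
--     # answer内のすべてのカンマについて、直前の文字が数字でなければTrue
--     for idx, char in enumerate(answer):
--         if char == ",":
--             # idxが0の場合は前に文字がないのでスキップ（今回は数字判定対象外）
--             if idx > 0 and answer[idx - 1].isdigit():
--                 return False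
--     return True
-- ===== SOURCE B (Python) =====
-- def is_valid_answer(answer: str) -> bool:
--     parts = answer.split(",")
--     if len(parts) < 2:
--         return False
--     return all(not (part and part[-1].isdigit()) for part in parts[:-1])
-- ===== Notes on version B (the rewrite author's own statement) =====
-- stated objective: simpler
-- what changed: B splits the answer on commas and checks that each segment followed by a comma does not end in a digit, instead of A's indexed character scan that re-reads the predecessor via answer[idx-1].
import Mathlib
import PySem

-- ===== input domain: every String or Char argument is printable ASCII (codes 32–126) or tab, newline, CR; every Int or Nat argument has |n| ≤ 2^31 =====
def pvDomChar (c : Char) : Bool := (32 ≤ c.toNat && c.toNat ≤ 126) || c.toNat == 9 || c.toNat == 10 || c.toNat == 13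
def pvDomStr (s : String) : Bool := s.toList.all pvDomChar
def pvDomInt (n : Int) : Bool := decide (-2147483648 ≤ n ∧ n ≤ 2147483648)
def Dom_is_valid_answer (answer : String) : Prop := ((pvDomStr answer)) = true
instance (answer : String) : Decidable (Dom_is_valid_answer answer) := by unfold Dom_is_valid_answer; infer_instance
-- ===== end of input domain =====

-- B replaces A's indexed character scan (with answer[idx-1] lookback) by split-on-comma
-- plus an endpoint check of each segment that is followed by a comma; objective: simpler.

-- ===== PORT A =====
-- the for-loop over enumerate(answer); answer[idx-1] is guarded by idx > 0, so the
-- pyGet? is always `some` where it is read and `.getD ' '` never supplies the default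
def pvLoopA (cs : List Char) : List (Int × Char) → Bool
  | [] => true
  | (idx, ch) :: rest =>
    if ch = ',' then
      if idx > 0 && PySem.Chars.isdigit ((PySem.List.pyGet? cs (idx - 1)).getD ' ') then false
      else pvLoopA cs rest
    else pvLoopA cs rest

def is_valid_answer (answer : String) : Bool :=
  if !(PySem.Str.isIn "," answer) then false
  else pvLoopA answer.toList (PySem.List.enumerate answer.toList 0)

-- ===== PORT B =====
def is_valid_answer_alt (answer : String) : Bool :=
  let parts := PySem.Chars.splitOn answer.toList [',']
  if parts.length < 2 then false
  else parts.dropLast.all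
    (fun part => !(!part.isEmpty && PySem.Chars.isdigit ((PySem.List.pyGet? part (-1)).getD ' ')))

-- ===== PRECONDITION & SPEC =====
def Spec_is_valid_answer (answer : String) (out : Bool) : Prop := out = is_valid_answer_alt answer
instance (answer : String) (out : Bool) : Decidable (Spec_is_valid_answer answer out) := by unfold Spec_is_valid_answer; infer_instance

-- ===== CLAIM (what is proved, stated in full; the proofs are below) =====
def Claim_equal_is_valid_answer : Prop := ∀ (answer : String), Dom_is_valid_answer answer → Spec_is_valid_answer answer (is_valid_answer answer)

-- ===== LEMMAS AND PROOFS =====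

-- the common intermediate form: a scan carrying "previous char is a digit"
def pvScanD : Bool → List Char → Bool
  | _, [] => true
  | pd, c :: rest => if c = ',' then !pd && pvScanD false rest else pvScanD (PySem.Chars.isdigit c) rest

-- accumulator-style single-char split, the shape splitOn.go reduces to for sep = [',']
def pvSplit : List Char → List Char → List (List Char)
  | cur, [] => [cur]
  | cur, c :: rest => if c = ',' then cur :: pvSplit [] rest else pvSplit (cur ++ [c]) rest

lemma pvSingleton_infix_iff (c : Char) (l : List Char) : [c] <:+: l ↔ c ∈ l := by
  constructor
  · intro h; exact h.subset (List.mem_singleton_self c)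
  · intro h
    obtain ⟨s, t, rfl⟩ := List.append_of_mem h
    exact ⟨s, t, by simp⟩

lemma pvGo_eq (l : List Char) : ∀ (fuel : Nat) (cur : List Char) (acc : List (List Char)), l.length < fuel →
    PySem.Chars.splitOn.go [','] fuel l cur acc = acc.reverse ++ pvSplit cur.reverse l := by
  induction l with
  | nil =>
    intro fuel cur acc h
    cases fuel with
    | zero => omega
    | succ f => simp [PySem.Chars.splitOn.go, pvSplit]
  | cons c rest ih =>
    intro fuel cur acc h
    cases fuel with
    | zero => omega
    | succ f =>
      by_cases hc : c = ','
      · subst hc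
        have hp : List.isPrefixOf [','] (',' :: rest) = true := by simp [List.isPrefixOf]
        simp only [PySem.Chars.splitOn.go, hp, if_pos]
        rw [show List.drop [','].length (',' :: rest) = rest from rfl,
          ih f [] (cur.reverse :: acc) (by simpa using h)]
        simp [pvSplit]
      · have hp : List.isPrefixOf [','] (c :: rest) = false := by
          simp [List.isPrefixOf]
          exact fun h => hc h.symm
        simp only [PySem.Chars.splitOn.go, hp]
        rw [if_neg (by simp), ih f (c :: cur) acc (by simpa using h)]
        simp [pvSplit, hc]

lemma pvSplit_ne_nil (l cur : List Char) : pvSplit cur l ≠ [] := by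
  induction l generalizing cur with
  | nil => simp [pvSplit]
  | cons c rest ih => by_cases hc : c = ',' <;> simp [pvSplit, hc, ih]

lemma pvSplit_two_le (l : List Char) : ∀ cur, 2 ≤ (pvSplit cur l).length ↔ ',' ∈ l := by
  induction l with
  | nil => intro cur; simp [pvSplit]
  | cons c rest ih =>
    intro cur
    by_cases hc : c = ','
    · subst hc
      have h1 : 0 < (pvSplit [] rest).length := List.length_pos_of_ne_nil (pvSplit_ne_nil rest [])
      simp [pvSplit]
      omega
    · simp [pvSplit, hc, ih]
      exact fun h => absurd h.symm hc

-- "previous char (= last of cur) is a digit"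
def pvPd (cur : List Char) : Bool := (cur.getLast?.map PySem.Chars.isdigit).getD false

lemma pvOk_eq (p : List Char) :
    (!(!p.isEmpty && PySem.Chars.isdigit ((PySem.List.pyGet? p (-1)).getD ' '))) = !pvPd p := by
  induction p using List.reverseRecOn with
  | nil => simp [pvPd]
  | append_singleton ys c _ =>
    have hg : PySem.List.pyGet? (ys ++ [c]) (-1) = some c := by
      simp [PySem.List.pyGet?, PySem.List.pyIdx?]
    simp [pvPd, hg]

lemma pvB_eq_scan (l : List Char) : ∀ cur,
    ((pvSplit cur l).dropLast.all
      (fun part => !(!part.isEmpty && PySem.Chars.isdigit ((PySem.List.pyGet? part (-1)).getD ' '))))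
    = pvScanD (pvPd cur) l := by
  induction l with
  | nil => intro cur; simp [pvSplit, pvScanD]
  | cons c rest ih =>
    intro cur
    by_cases hc : c = ','
    · subst hc
      rw [pvSplit, if_pos rfl,
        List.dropLast_cons_of_ne_nil (pvSplit_ne_nil rest []), List.all_cons, pvOk_eq, ih []]
      simp [pvScanD, pvPd]
    · rw [pvSplit, if_neg hc, ih (cur ++ [c])]
      simp [pvScanD, hc, pvPd]

lemma pvA_eq_scan (suf : List Char) : ∀ (pre : List Char) (c : Char),
    pvLoopA (pre ++ c :: suf) (PySem.List.enumerate suf ((pre.length : Int) + 1))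
    = pvScanD (PySem.Chars.isdigit c) suf := by
  induction suf with
  | nil => intro pre c; simp [PySem.List.enumerate, pvLoopA, pvScanD]
  | cons x rest ih =>
    intro pre c
    rw [PySem.List.enumerate_cons, pvLoopA]
    have hidx : ((pre.length : Int) + 1) - 1 = (pre.length : Int) := by ring
    have hget : PySem.List.pyGet? (pre ++ c :: x :: rest) ((pre.length : Int)) = some c := by
      rw [PySem.List.pyGet?_natCast]
      simp
    have hpos : (0 : Int) < (pre.length : Int) + 1 := by positivity
    have hrec : pvLoopA (pre ++ c :: x :: rest)
        (PySem.List.enumerate rest ((pre.length : Int) + 1 + 1))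
        = pvScanD (PySem.Chars.isdigit x) rest := by
      have h2 : (((pre ++ [c]).length : Int) + 1) = (pre.length : Int) + 1 + 1 := by
        simp
      have := ih (pre ++ [c]) x
      rw [List.append_assoc] at this
      simpa [h2] using this
    by_cases hx : x = ','
    · subst hx
      rw [if_pos rfl, hidx, hget]
      have hcomma : PySem.Chars.isdigit ',' = false := by decide
      cases hd : PySem.Chars.isdigit c with
      | true => simp [hpos, hd, pvScanD]
      | false =>
        rw [if_neg (by simp [hd]), hrec, hcomma]
        simp [pvScanD]
    · rw [if_neg hx, hrec]
      simp [pvScanD, hx]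

lemma pvMain (answer : String) : is_valid_answer answer = is_valid_answer_alt answer := by
  unfold is_valid_answer is_valid_answer_alt
  have hsplit : PySem.Chars.splitOn answer.toList [','] = pvSplit [] answer.toList := by
    unfold PySem.Chars.splitOn
    rw [pvGo_eq answer.toList (answer.toList.length + 1) [] [] (Nat.lt_succ_self _)]
    simp
  by_cases hm : ',' ∈ answer.toList
  · have hin : PySem.Str.isIn "," answer = true := by
      rw [PySem.Str.isIn_iff_infix]
      exact (pvSingleton_infix_iff ',' answer.toList).mpr hm
    have h2 : ¬ (pvSplit [] answer.toList).length < 2 := by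
      have := (pvSplit_two_le answer.toList []).mpr hm
      omega
    rw [hsplit]
    simp only [hin, Bool.not_true, Bool.false_eq_true, if_false, h2, if_false]
    rw [pvB_eq_scan]
    cases hcs : answer.toList with
    | nil => rw [hcs] at hm; simp at hm
    | cons c0 rest =>
      rw [PySem.List.enumerate_cons, pvLoopA]
      have h0 : ¬ ((0 : Int) > 0) := by omega
      have hstep : pvLoopA (c0 :: rest) (PySem.List.enumerate rest (0 + 1))
          = pvScanD (PySem.Chars.isdigit c0) rest := by
        have := pvA_eq_scan rest [] c0
        simpa using this
      by_cases hc0 : c0 = ','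
      · subst hc0
        rw [if_pos rfl, if_neg (by simp), hstep,
          show PySem.Chars.isdigit ',' = false from by decide]
        simp [pvScanD]
        intro _
        rfl
      · rw [if_neg hc0, hstep]
        simp [pvScanD, hc0]
  · have hin : PySem.Str.isIn "," answer = false := by
      rw [← Bool.not_eq_true, PySem.Str.isIn_iff_infix]
      intro h
      exact hm ((pvSingleton_infix_iff ',' answer.toList).mp (by simpa using h))
    have h2 : (pvSplit [] answer.toList).length < 2 := by
      have := (pvSplit_two_le answer.toList []).not.mpr hm
      omega
    have hin2 : PySem.Chars.isIn [','] answer.toList = false := by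
      rw [← Bool.not_eq_true, PySem.Chars.isIn_iff_infix]
      exact fun hh => hm ((pvSingleton_infix_iff ',' answer.toList).mp hh)
    rw [hsplit]
    simp [hin2, h2]

-- ===== VERDICT (by name: the statement is the Claim_ definition above) =====
theorem is_valid_answer_spec : Claim_equal_is_valid_answer := by
  intro answer _
  unfold Spec_is_valid_answer
  exact pvMain answer
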